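-- pv_equiv track=rewrite | github.com/dengsauve/advent-of-code-2025 | day06.py | parse_column_lengths
-- ===== SOURCE A (Python) =====
-- def parse_column_lengths(input):
--     count = 0
--     first = True
--     column_lengths = []
--
--     for operator in input[-1].split(" "):
--         if operator != "":
--             if first:
--                 first = False
--             else:
--                 column_lengths.append(count)
--             count = 1
--         elif operator == "":
--             count += 1
--     column_lengths.append(count) # Cleanup
--
--     return column_lengths
-- ===== SOURCE B (Python) =====
-- def parse_column_lengths(input):
--     tokens = input[-1].split(" ")
--     starts = [i for i, t in enumerate(tokens) if t != ""] or [0]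
--     ends = starts[1:] + [len(tokens)]
--     return [e - s for s, e in zip(starts, ends)]
-- ===== Notes on version B (the rewrite author's own statement) =====
-- stated objective: alternative
-- what changed: Replaced A's single-pass accumulator with a first-flag and running count by an index-table-then-differences decomposition: collect the positions of non-empty tokens of input[-1].split(" ") (defaulting to [0] when there are none) and return consecutive differences closed off by the token count.
import Mathlib
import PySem

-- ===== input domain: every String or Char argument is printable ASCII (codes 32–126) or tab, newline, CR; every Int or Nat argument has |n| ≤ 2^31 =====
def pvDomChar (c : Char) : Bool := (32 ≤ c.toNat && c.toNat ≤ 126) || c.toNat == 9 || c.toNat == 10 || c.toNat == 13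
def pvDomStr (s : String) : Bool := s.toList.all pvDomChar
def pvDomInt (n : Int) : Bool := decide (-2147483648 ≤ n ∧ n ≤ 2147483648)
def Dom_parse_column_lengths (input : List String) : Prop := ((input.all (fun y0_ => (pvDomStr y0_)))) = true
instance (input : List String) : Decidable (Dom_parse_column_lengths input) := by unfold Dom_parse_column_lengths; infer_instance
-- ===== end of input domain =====

-- B replaces A's one-pass first-flag/count accumulator by an index-table-then-differences
-- decomposition (positions of non-empty tokens, then consecutive differences); objective: alternative.

-- ===== PORT A =====
-- the for-loop of A, state = (count, first, column_lengths); the final append is the base case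
def pclLoop : List String → Int → Bool → List Int → List Int
  | [], count, _first, acc => acc ++ [count]
  | op :: rest, count, first, acc =>
    if op ≠ "" then
      pclLoop rest 1 false (if first then acc else acc ++ [count])
    else
      pclLoop rest (count + 1) first acc

def parse_column_lengths (input : List String) : List Int :=
  pclLoop ((PySem.Str.split? ((PySem.List.pyGet? input (-1)).getD "") " ").getD []) 0 true []

-- ===== PORT B =====
def parse_column_lengths_alt (input : List String) : List Int :=
  let tokens := (PySem.Str.split? ((PySem.List.pyGet? input (-1)).getD "") " ").getD []
  let starts0 := ((PySem.List.enumerate tokens).filter (fun p => p.2 != "")).map (fun p => p.1)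
  let starts := if starts0.isEmpty then [(0 : Int)] else starts0
  let ends := starts.drop 1 ++ [(tokens.length : Int)]
  (starts.zip ends).map (fun p => p.2 - p.1)

-- ===== PRECONDITION & SPEC =====
-- Pre_ excludes exactly the empty list, on which A raises IndexError at input[-1].
def Pre_parse_column_lengths (input : List String) : Prop := input ≠ []
instance (input : List String) : Decidable (Pre_parse_column_lengths input) := by
  unfold Pre_parse_column_lengths; infer_instance
def pvWitness_parse_column_lengths : List String := ["ab cd  e"]

def Spec_parse_column_lengths (input : List String) (out : List Int) : Prop := out = parse_column_lengths_alt input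
instance (input : List String) (out : List Int) : Decidable (Spec_parse_column_lengths input out) := by unfold Spec_parse_column_lengths; infer_instance

-- ===== CLAIM (what is proved, stated in full; the proofs are below) =====
def Claim_equal_parse_column_lengths : Prop := ∀ (input : List String), Dom_parse_column_lengths input → Pre_parse_column_lengths input → Spec_parse_column_lengths input (parse_column_lengths input)

-- ===== LEMMAS AND PROOFS =====

-- positions (0-based) of the non-empty tokens
def idxs : List String → List Int
  | [] => []
  | t :: ts => if t ≠ "" then 0 :: (idxs ts).map (· + 1) else (idxs ts).map (· + 1)

-- consecutive differences, closed off by n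
def Dd : List Int → Int → List Int
  | [], _ => []
  | [a], n => [n - a]
  | a :: b :: rest, n => (b - a) :: Dd (b :: rest) n

lemma zip_diff_eq_Dd (l : List Int) (n : Int) :
    (l.zip (l.drop 1 ++ [n])).map (fun p => p.2 - p.1) = Dd l n := by
  induction l with
  | nil => simp [Dd]
  | cons a tail ih =>
    cases tail with
    | nil => simp [Dd]
    | cons b rest => simpa [Dd] using ih

lemma Dd_shift (l : List Int) (n : Int) :
    Dd (l.map (· + 1)) (n + 1) = Dd l n := by
  induction l with
  | nil => simp [Dd]
  | cons a tail ih =>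
    cases tail with
    | nil => simp only [List.map_cons, List.map_nil, Dd]; congr 1; ring
    | cons b rest =>
      simp only [List.map_cons, Dd] at ih ⊢
      rw [ih]; congr 1; ring

lemma enumerate_filter_map (ts : List String) (s : Int) :
    ((PySem.List.enumerate ts s).filter (fun p => p.2 != "")).map (fun p => p.1)
      = (idxs ts).map (· + s) := by
  induction ts generalizing s with
  | nil => simp [PySem.List.enumerate_nil, idxs]
  | cons t ts ih =>
    rw [PySem.List.enumerate_cons]
    by_cases ht : t = ""
    · subst ht
      rw [List.filter_cons_of_neg (by simp), ih (s + 1)]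
      have h2 : idxs ("" :: ts) = (idxs ts).map (· + 1) := by simp [idxs]
      rw [h2, List.map_map]
      exact List.map_congr_left (fun x _ => by simp only [Function.comp_apply]; ring)
    · rw [List.filter_cons_of_pos (by simpa using ht), List.map_cons, ih (s + 1)]
      have h2 : idxs (t :: ts) = 0 :: (idxs ts).map (· + 1) := by simp [idxs, ht]
      rw [h2, List.map_cons, List.map_map]
      congr 1
      · ring
      · exact List.map_congr_left (fun x _ => by simp only [Function.comp_apply]; ring)

lemma pclLoop_false (ts : List String) (c : Int) (acc : List Int) :
    pclLoop ts c false acc = acc ++ (match idxs ts with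
      | [] => [c + (ts.length : Int)]
      | s :: ss => (c + s) :: Dd (s :: ss) (ts.length : Int)) := by
  induction ts generalizing c acc with
  | nil => simp [pclLoop, idxs]
  | cons t ts ih =>
    have hs : (((t :: ts).length : Nat) : Int) = (ts.length : Int) + 1 := by
      push_cast [List.length_cons]; ring
    by_cases ht : t = ""
    · subst ht
      have h1 : pclLoop ("" :: ts) c false acc = pclLoop ts (c + 1) false acc := by
        simp [pclLoop]
      have h2 : idxs ("" :: ts) = (idxs ts).map (· + 1) := by simp [idxs]
      rw [h1, ih, h2, hs]
      cases hI : idxs ts with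
      | nil => simp only [List.map_nil]; congr 2; ring
      | cons s ss =>
        simp only [List.map_cons]
        have hsh := Dd_shift (s :: ss) (ts.length : Int)
        simp only [List.map_cons] at hsh
        rw [hsh]
        congr 2
        ring
    · have h1 : pclLoop (t :: ts) c false acc = pclLoop ts 1 false (acc ++ [c]) := by
        simp [pclLoop, ht]
      have h2 : idxs (t :: ts) = 0 :: (idxs ts).map (· + 1) := by simp [idxs, ht]
      rw [h1, ih, h2, hs]
      cases hI : idxs ts with
      | nil =>
        simp only [List.map_nil, Dd, List.append_assoc, List.singleton_append]
        congr 3 <;> ring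
      | cons s ss =>
        simp only [List.map_cons, Dd, List.append_assoc, List.singleton_append]
        have hsh := Dd_shift (s :: ss) (ts.length : Int)
        simp only [List.map_cons] at hsh
        rw [hsh]
        congr 2
        · ring
        · congr 1
          ring
lemma pclLoop_true (ts : List String) (c : Int) (acc : List Int) :
    pclLoop ts c true acc = acc ++ (match idxs ts with
      | [] => [c + (ts.length : Int)]
      | _ :: _ => Dd (idxs ts) (ts.length : Int)) := by
  induction ts generalizing c with
  | nil => simp [pclLoop, idxs]
  | cons t ts ih =>
    have hs : (((t :: ts).length : Nat) : Int) = (ts.length : Int) + 1 := by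
      push_cast [List.length_cons]; ring
    by_cases ht : t = ""
    · subst ht
      have h1 : pclLoop ("" :: ts) c true acc = pclLoop ts (c + 1) true acc := by
        simp [pclLoop]
      have h2 : idxs ("" :: ts) = (idxs ts).map (· + 1) := by simp [idxs]
      rw [h1, ih, h2, hs]
      cases hI : idxs ts with
      | nil => simp only [List.map_nil]; congr 2; ring
      | cons s ss =>
        simp only [List.map_cons]
        have hsh := Dd_shift (s :: ss) (ts.length : Int)
        simp only [List.map_cons] at hsh
        rw [hsh]
    · have h1 : pclLoop (t :: ts) c true acc = pclLoop ts 1 false acc := by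
        simp [pclLoop, ht]
      have h2 : idxs (t :: ts) = 0 :: (idxs ts).map (· + 1) := by simp [idxs, ht]
      rw [h1, pclLoop_false, h2, hs]
      cases hI : idxs ts with
      | nil =>
        simp only [List.map_nil, Dd]
        congr 3; ring
      | cons s ss =>
        simp only [List.map_cons, Dd]
        have hsh := Dd_shift (s :: ss) (ts.length : Int)
        simp only [List.map_cons] at hsh
        rw [hsh]
        congr 2; ring

lemma filter_map_eq_idxs (ts : List String) :
    ((PySem.List.enumerate ts 0).filter (fun p => p.2 != "")).map (fun p => p.1) = idxs ts := by
  simpa using enumerate_filter_map ts 0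

-- ===== VERDICT (by name: the statement is the Claim_ definition above) =====
theorem parse_column_lengths_spec : Claim_equal_parse_column_lengths := by
  intro input _hdom _hpre
  unfold Spec_parse_column_lengths parse_column_lengths parse_column_lengths_alt
  set toks := (PySem.Str.split? ((PySem.List.pyGet? input (-1)).getD "") " ").getD [] with htoks
  rw [pclLoop_true]
  simp only [filter_map_eq_idxs, zip_diff_eq_Dd]
  cases h : idxs toks with
  | nil => simp [Dd]
  | cons s ss => simp
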